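-- pv_equiv track=rewrite | github.com/dgmdan/newsbyrob | scripts/support.py | urlformat
-- ===== SOURCE A (Python) =====
-- def urlformat(urls: list) -> str:
--     """
--     Formats the list of URLs into an HTML list with site and category printed once per group,
--     followed by a list of titles as links.
--
--     Args:
--         urls (list): List of new listings found, where each item is a tuple:
--                      (link, site, category, title).
--
--     Returns:
--         str: HTML formatted string for emailing.
--     """
--
--     if not urls:
--         return "<p>No new links found.</p>"
--
--     links_html = ""
--     prev_site_cat = None
--
--     for link, site, cat, title in urls:
--         current_site_cat = (site, cat)
--         if current_site_cat != prev_site_cat: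
--             if prev_site_cat is not None:
--                 links_html += "</ol>\n" + "-" * 45 + "\n"
--             links_html += f"<br><i><b>{site} - {cat}</b></i>\n<ol>"
--             prev_site_cat = current_site_cat
--         links_html += f"<li><a href='{link}'>{title}</a></li>"
--
--     links_html += "</ol>" # close the final list.
--     return links_html
-- ===== SOURCE B (Python) =====
-- def urlformat(urls: list) -> str:
--     """Group-then-render: split urls into consecutive (site, cat) runs, render
--     each run as one HTML block, then join the blocks with the dashed separator."""
--     if not urls:
--         return "<p>No new links found.</p>"
--
--     blocks = []
--     i = 0
--     n = len(urls)
--     while i < n: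
--         site, cat = urls[i][1], urls[i][2]
--         j = i
--         while j < n and (urls[j][1], urls[j][2]) == (site, cat):
--             j += 1
--         items = "".join(f"<li><a href='{link}'>{title}</a></li>"
--                         for link, _, _, title in urls[i:j])
--         blocks.append(f"<br><i><b>{site} - {cat}</b></i>\n<ol>{items}</ol>")
--         i = j
--     return ("\n" + "-" * 45 + "\n").join(blocks)
-- ===== Notes on version B (the rewrite author's own statement) =====
-- stated objective: alternative
-- what changed: B first splits the list into consecutive (site, cat) runs and renders each run as a self-contained HTML block joined by the dashed separator, instead of threading prev_site_cat state through one flat loop that emits closers/headers incrementally.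
import Mathlib
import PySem

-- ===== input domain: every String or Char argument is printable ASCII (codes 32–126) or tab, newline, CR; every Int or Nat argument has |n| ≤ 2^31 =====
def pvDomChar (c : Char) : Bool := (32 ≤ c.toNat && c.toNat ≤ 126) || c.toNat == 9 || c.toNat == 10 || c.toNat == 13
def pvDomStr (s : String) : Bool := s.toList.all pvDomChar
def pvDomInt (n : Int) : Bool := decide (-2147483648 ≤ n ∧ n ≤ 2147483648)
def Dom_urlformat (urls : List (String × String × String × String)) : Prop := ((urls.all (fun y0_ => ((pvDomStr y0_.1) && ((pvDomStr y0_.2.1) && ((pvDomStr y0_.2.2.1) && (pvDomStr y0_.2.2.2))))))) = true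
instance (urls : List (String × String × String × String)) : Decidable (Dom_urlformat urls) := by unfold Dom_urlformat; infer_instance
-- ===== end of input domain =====

-- B groups the list into consecutive (site, cat) runs and renders each run as a
-- self-contained block joined by the dashed separator, instead of A's single flat
-- loop threading prev_site_cat state (alternative decomposition, same cost).


-- ===== PORT A =====
-- "-" * 45
def pvDashes : String := "---------------------------------------------"

-- the for-loop of A: state = (links_html accumulator, prev_site_cat : Option)
def urlformatLoop : List (String × String × String × String) → String → Option (String × String) → String
  | [], acc, _ => acc
  | (link, site, cat, title) :: rest, acc, prev =>
      let cur := (site, cat)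
      if some cur ≠ prev then
        let acc1 := if prev.isSome then acc ++ "</ol>\n" ++ pvDashes ++ "\n" else acc
        let acc2 := acc1 ++ "<br><i><b>" ++ site ++ " - " ++ cat ++ "</b></i>\n<ol>"
        urlformatLoop rest (acc2 ++ "<li><a href='" ++ link ++ "'>" ++ title ++ "</a></li>") (some cur)
      else
        urlformatLoop rest (acc ++ "<li><a href='" ++ link ++ "'>" ++ title ++ "</a></li>") prev

def urlformat (urls : List (String × String × String × String)) : String :=
  if urls = [] then "<p>No new links found.</p>"
  else urlformatLoop urls "" none ++ "</ol>"

-- ===== PORT B =====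
-- one <li> item for a tuple (link, site, cat, title)
def bItem (u : String × String × String × String) : String :=
  "<li><a href='" ++ u.1 ++ "'>" ++ u.2.2.2 ++ "</a></li>"

-- B's inner while loop: take the run with key (site, cat), return (run, remainder)
def bTakeRun (k : String × String) :
    List (String × String × String × String) →
    List (String × String × String × String) × List (String × String × String × String)
  | [] => ([], [])
  | u :: rest =>
      if (u.2.1, u.2.2.1) = k then
        let p := bTakeRun k rest
        (u :: p.1, p.2)
      else ([], u :: rest)

theorem bTakeRun_snd_length_le (k : String × String)
    (l : List (String × String × String × String)) : (bTakeRun k l).2.length ≤ l.length := by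
  induction l with
  | nil => simp [bTakeRun]
  | cons u rest ih =>
      simp only [bTakeRun]
      split
      · simpa using Nat.le_succ_of_le ih
      · simp

-- B's outer while loop: the list of consecutive (site, cat) runs
def bRuns : List (String × String × String × String) → List (List (String × String × String × String))
  | [] => []
  | u :: rest =>
      let p := bTakeRun (u.2.1, u.2.2.1) rest
      (u :: p.1) :: bRuns p.2
termination_by l => l.length
decreasing_by exact Nat.lt_succ_of_le (bTakeRun_snd_length_le _ _)

-- one rendered block for a run (a run is always nonempty)
def bBlock : List (String × String × String × String) → String
  | [] => ""
  | u :: rest =>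
      "<br><i><b>" ++ u.2.1 ++ " - " ++ u.2.2.1 ++ "</b></i>\n<ol>" ++
        PySem.Str.join "" ((u :: rest).map bItem) ++ "</ol>"

def urlformat_alt (urls : List (String × String × String × String)) : String :=
  if urls = [] then "<p>No new links found.</p>"
  else PySem.Str.join ("\n" ++ pvDashes ++ "\n") ((bRuns urls).map bBlock)

-- ===== PRECONDITION & SPEC =====
def Spec_urlformat (urls : List (String × String × String × String)) (out : String) : Prop := out = urlformat_alt urls
instance (urls : List (String × String × String × String)) (out : String) : Decidable (Spec_urlformat urls out) := by unfold Spec_urlformat; infer_instance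

-- ===== CLAIM (what is proved, stated in full; the proofs are below) =====
def Claim_equal_urlformat : Prop := ∀ (urls : List (String × String × String × String)), Dom_urlformat urls → Spec_urlformat urls (urlformat urls)

-- ===== LEMMAS AND PROOFS =====
theorem join_cons_cons (s a b : String) (as : List String) :
    PySem.Str.join s (a :: b :: as) = a ++ s ++ PySem.Str.join s (b :: as) := by
  simp [PySem.Str.join, PySem.Chars.join_cons_cons, String.append_assoc]

theorem join_singleton (s a : String) : PySem.Str.join s [a] = a := by
  simp [PySem.Str.join, PySem.Chars.join_singleton]

-- the accumulator of A's loop only ever grows on the right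
theorem urlformatLoop_acc (l : List (String × String × String × String))
    (acc : String) (prev : Option (String × String)) :
    urlformatLoop l acc prev = acc ++ urlformatLoop l "" prev := by
  induction l generalizing acc prev with
  | nil => simp [urlformatLoop]
  | cons u rest ih =>
      obtain ⟨link, site, cat, title⟩ := u
      simp only [urlformatLoop]
      split
      · rw [ih]; conv_rhs => rw [ih]
        cases prev <;> simp [String.append_assoc]
      · rw [ih]; conv_rhs => rw [ih]
        simp [String.append_assoc]

-- shorthand for the proofs below
def pvSep : String := "\n" ++ pvDashes ++ "\n"

def pvRest (rest : List (String × String × String × String)) : String :=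
  if rest = [] then "" else pvSep ++ PySem.Str.join pvSep ((bRuns rest).map bBlock)

theorem join_nil (s : String) : PySem.Str.join s [] = "" := by
  simp [PySem.Str.join, PySem.Chars.join_nil]

theorem join_empty_cons (a : String) (as : List String) :
    PySem.Str.join "" (a :: as) = a ++ PySem.Str.join "" as := by
  cases as with
  | nil => rw [join_singleton, join_nil]; simp
  | cons b bs => rw [join_cons_cons]; simp

theorem sep_merge (x : String) :
    "</ol>" ++ ("\n---------------------------------------------\n" ++ x) =
      "</ol>\n---------------------------------------------\n" ++ x := by
  rw [← String.append_assoc]; rfl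

-- main invariant: A's loop, resumed inside a group with key k, produces the items of
-- the current run, the close tag, and then B's rendering of the remaining runs
theorem loop_eq (l : List (String × String × String × String)) (k : String × String) :
    urlformatLoop l "" (some k) ++ "</ol>" =
      PySem.Str.join "" ((bTakeRun k l).1.map bItem) ++ "</ol>" ++ pvRest (bTakeRun k l).2 := by
  induction l generalizing k with
  | nil => simp [urlformatLoop, bTakeRun, pvRest, join_nil]
  | cons u rest ih =>
      obtain ⟨link, site, cat, title⟩ := u
      by_cases hk : (site, cat) = k
      · have hcond : ¬ (some (site, cat) ≠ some k) := by simp [hk]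
        simp only [urlformatLoop, bTakeRun, if_neg hcond, if_pos hk]
        rw [urlformatLoop_acc]
        simp only [String.append_assoc]
        rw [ih k, List.map_cons, join_empty_cons]
        simp [String.append_assoc, bItem]
      · have hcond : (some (site, cat) ≠ some k) := by simp [hk]
        simp only [urlformatLoop, bTakeRun, if_pos hcond, if_neg hk, Option.isSome_some]
        rw [urlformatLoop_acc]
        simp only [String.append_assoc]
        rw [ih (site, cat)]
        simp only [List.map_nil, join_nil, pvRest]
        rw [if_neg (by simp : ¬ ((link, site, cat, title) :: rest = []))]
        rcases h2 : (bTakeRun (site, cat) rest).2 with _ | ⟨v, vs⟩ <;>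
          simp [h2, bRuns, bBlock, bItem, join_singleton, join_empty_cons, join_cons_cons,
                pvSep, pvDashes, String.append_assoc, sep_merge]

theorem urlformat_spec : Claim_equal_urlformat := by
  intro urls _
  unfold Spec_urlformat urlformat urlformat_alt
  cases urls with
  | nil => rfl
  | cons u rest =>
      obtain ⟨link, site, cat, title⟩ := u
      rw [if_neg (by simp : ¬ ((link, site, cat, title) :: rest = [])),
          if_neg (by simp : ¬ ((link, site, cat, title) :: rest = []))]
      simp only [urlformatLoop, Option.isSome_none,
                 if_pos (by simp : some (site, cat) ≠ (none : Option (String × String)))]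
      rw [urlformatLoop_acc]
      simp only [String.append_assoc, Bool.false_eq_true, if_false]
      rw [loop_eq rest (site, cat)]
      simp only [pvRest]
      rcases h2 : (bTakeRun (site, cat) rest).2 with _ | ⟨v, vs⟩ <;>
        simp [h2, bRuns, bBlock, bItem, join_singleton, join_empty_cons, join_cons_cons,
              pvSep, pvDashes, String.append_assoc, sep_merge]
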